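-- pv_equiv track=rewrite | github.com/Zakeiswo/TeaSys_Dev | main/testteacher.py | dicCommonDeleter
-- ===== SOURCE A (Python) =====
-- def dicCommonDeleter(dict_1, dict_2):
--     dict_1_temp = dict_1.copy()
--     dict_2_temp = dict_2.copy()
--     set_common = dict_1.keys() & dict_2.keys()  # set
--     for item in set_common:
--         dict_1_temp.pop(item)
--         dict_2_temp.pop(item)
--     return dict_1_temp, dict_2_temp
-- ===== SOURCE B (Python) =====
-- def dicCommonDeleter(dict_1, dict_2):
--     return (
--         {k: v for k, v in dict_1.items() if k not in dict_2},
--         {k: v for k, v in dict_2.items() if k not in dict_1},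
--     )
-- ===== Notes on version B (the rewrite author's own statement) =====
-- stated objective: simpler
-- what changed: Replaces copy-then-pop over a precomputed key-intersection set with two dict comprehensions that filter each dict's items by membership in the other dict.
import Mathlib
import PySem

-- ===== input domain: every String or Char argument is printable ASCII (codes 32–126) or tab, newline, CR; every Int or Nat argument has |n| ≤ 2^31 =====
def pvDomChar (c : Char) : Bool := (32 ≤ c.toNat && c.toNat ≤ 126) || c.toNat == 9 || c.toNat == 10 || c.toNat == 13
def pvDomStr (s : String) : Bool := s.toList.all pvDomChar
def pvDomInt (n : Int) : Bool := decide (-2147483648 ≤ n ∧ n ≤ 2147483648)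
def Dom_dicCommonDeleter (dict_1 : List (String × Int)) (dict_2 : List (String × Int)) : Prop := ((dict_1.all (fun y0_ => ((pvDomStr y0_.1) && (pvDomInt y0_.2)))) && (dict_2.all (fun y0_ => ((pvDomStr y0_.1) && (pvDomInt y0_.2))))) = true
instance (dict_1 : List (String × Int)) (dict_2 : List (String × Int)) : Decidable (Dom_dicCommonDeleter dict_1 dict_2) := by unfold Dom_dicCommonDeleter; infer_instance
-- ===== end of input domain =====

-- B replaces A's copy-then-pop over a precomputed key-intersection set with two
-- dict comprehensions filtering each dict by membership in the other (simpler).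


-- ===== PORT A =====
-- The association-list arguments stand for Python dicts: each is first realised
-- as a PySem.Dict via ofList (exactly Python's dict construction).
def dicCommonDeleter (dict_1 : List (String × Int)) (dict_2 : List (String × Int)) : (List (String × Int)) × (List (String × Int)) :=
  let d1 := PySem.Dict.ofList dict_1
  let d2 := PySem.Dict.ofList dict_2
  let dict_1_temp := d1   -- dict_1.copy()
  let dict_2_temp := d2   -- dict_2.copy()
  -- dict_1.keys() & dict_2.keys(); the pop-loop's result is iteration-order independent
  let set_common : PySem.Set String := PySem.Set.inter (PySem.Set.ofList d1.keys) d2.keys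
  let res := set_common.foldl
    (fun (p : PySem.Dict String Int × PySem.Dict String Int) item =>
      (p.1.erase item, p.2.erase item))            -- .pop(item) on a present key
    (dict_1_temp, dict_2_temp)
  (res.1.items, res.2.items)

-- ===== PORT B =====
def dicCommonDeleter_alt (dict_1 : List (String × Int)) (dict_2 : List (String × Int)) : (List (String × Int)) × (List (String × Int)) :=
  let d1 := PySem.Dict.ofList dict_1
  let d2 := PySem.Dict.ofList dict_2
  (d1.items.filter (fun kv => !(d2.contains kv.1)),
   d2.items.filter (fun kv => !(d1.contains kv.1)))

-- ===== PRECONDITION & SPEC =====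
def Spec_dicCommonDeleter (dict_1 : List (String × Int)) (dict_2 : List (String × Int)) (out : (List (String × Int)) × (List (String × Int))) : Prop := out = dicCommonDeleter_alt dict_1 dict_2
instance (dict_1 : List (String × Int)) (dict_2 : List (String × Int)) (out : (List (String × Int)) × (List (String × Int))) : Decidable (Spec_dicCommonDeleter dict_1 dict_2 out) := by unfold Spec_dicCommonDeleter; infer_instance

-- ===== CLAIM (what is proved, stated in full; the proofs are below) =====
def Claim_equal_dicCommonDeleter : Prop := ∀ (dict_1 : List (String × Int)) (dict_2 : List (String × Int)), Dom_dicCommonDeleter dict_1 dict_2 → Spec_dicCommonDeleter dict_1 dict_2 (dicCommonDeleter dict_1 dict_2)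

-- ===== LEMMAS AND PROOFS =====

-- a fold stepping the two components independently is the pair of the two folds
theorem foldl_pair {α β γ : Type} (f : α → γ → α) (g : β → γ → β)
    (ks : List γ) (a : α) (b : β) :
    ks.foldl (fun (p : α × β) k => (f p.1 k, g p.2 k)) (a, b) =
      (ks.foldl f a, ks.foldl g b) := by
  induction ks generalizing a b with
  | nil => rfl
  | cons k ks ih => simp [List.foldl_cons, ih]

-- erasing every key of ks from a dict filters its items by non-membership in ks
theorem items_foldl_erase (ks : List String) (d : PySem.Dict String Int) :
    (ks.foldl (fun d k => d.erase k) d).items =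
      d.items.filter (fun p => !(ks.contains p.1)) := by
  induction ks generalizing d with
  | nil => simp
  | cons k ks ih =>
      rw [List.foldl_cons, ih]
      simp only [PySem.Dict.erase, List.filter_filter]
      apply List.filter_congr
      intro p _
      by_cases h : p.1 = k <;> simp [h]

-- membership in A's intersection set, as a Bool equation
theorem common_contains (d1 d2 : PySem.Dict String Int) (x : String) :
    List.contains (PySem.Set.inter (PySem.Set.ofList d1.keys) d2.keys) x
      = (d1.contains x && d2.contains x) := by
  rw [Bool.eq_iff_iff]
  simp [PySem.Set.mem_inter, PySem.Set.mem_ofList,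
        PySem.Dict.contains_iff_mem_keys]

theorem dicCommonDeleter_spec_aux (dict_1 dict_2 : List (String × Int)) :
    dicCommonDeleter dict_1 dict_2 = dicCommonDeleter_alt dict_1 dict_2 := by
  unfold dicCommonDeleter dicCommonDeleter_alt
  simp only [foldl_pair, items_foldl_erase]
  rw [Prod.mk.injEq]
  refine ⟨List.filter_congr ?_, List.filter_congr ?_⟩ <;> intro p hp <;>
    rw [common_contains]
  · have h1 : (PySem.Dict.ofList dict_1).contains p.1 = true := by
      rw [PySem.Dict.contains_iff_mem_keys]
      exact PySem.Dict.mem_keys_of_mem_items _ hp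
    simp [h1]
  · have h2 : (PySem.Dict.ofList dict_2).contains p.1 = true := by
      rw [PySem.Dict.contains_iff_mem_keys]
      exact PySem.Dict.mem_keys_of_mem_items _ hp
    simp [h2]

-- ===== VERDICT (by name: the statement is the Claim_ definition above) =====
theorem dicCommonDeleter_spec : Claim_equal_dicCommonDeleter := by
  intro d1 d2 _
  exact dicCommonDeleter_spec_aux d1 d2
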